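-- pv_equiv track=rewrite | github.com/Hari851-max/5289837_HARI-PRASHANTH | Hackerrank/Week_3/Waiter.py | waiter
-- ===== SOURCE A (Python) =====
-- def generate_primes(limit):
--     sieve = [True] * (limit + 1)
--     sieve[0] = sieve[1] = False
--     for i in range(2, int(limit**0.5) + 1):
--         if sieve[i]:
--             for j in range(i*i, limit + 1, i):
--                 sieve[j] = False
--     return [i for i, is_prime in enumerate(sieve) if is_prime]
--
-- def waiter(number, q):
--     primes = generate_primes(10000)
--     answers = []
--     A = number[:]
--
--     for i in range(q):
--         prime = primes[i]
--         A_next = []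
--         B = []
--
--         while A:
--             plate = A.pop()
--             if plate % prime == 0:
--                 B.append(plate)
--             else:
--                 A_next.append(plate)
--
--         answers.extend(reversed(B))
--
--         A = A_next
--     answers.extend(reversed(A))
--     return answers
-- ===== SOURCE B (Python) =====
-- def generate_primes(limit):
--     sieve = [True] * (limit + 1)
--     sieve[0] = sieve[1] = False
--     for i in range(2, int(limit**0.5) + 1):
--         if sieve[i]:
--             for j in range(i*i, limit + 1, i):
--                 sieve[j] = False
--     return [i for i, is_prime in enumerate(sieve) if is_prime]
--
-- def waiter(number, q):
--     primes = generate_primes(10000)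
--     qq = max(q, 0)
--     ps = [primes[i] for i in range(qq)]
--     buckets = [[] for _ in range(qq + 1)]
--     for plate in number:
--         i = next((j for j, p in enumerate(ps) if plate % p == 0), qq)
--         buckets[i].append(plate)
--     out = []
--     flip = False
--     while buckets:
--         b = buckets.pop(0)
--         if buckets:
--             out.extend(reversed(b) if flip else b)
--             flip = not flip
--         else:
--             out.extend(b if flip else reversed(b))
--     return out
-- ===== Notes on version B (the rewrite author's own statement) =====
-- stated objective: alternative
-- what changed: A runs q passes, each popping the whole remaining stack and rebuilding it, then emits each round's picks; B classifies every plate once by its first dividing prime into q+1 buckets and emits the buckets with an alternating-reversal flag.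
import Mathlib
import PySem

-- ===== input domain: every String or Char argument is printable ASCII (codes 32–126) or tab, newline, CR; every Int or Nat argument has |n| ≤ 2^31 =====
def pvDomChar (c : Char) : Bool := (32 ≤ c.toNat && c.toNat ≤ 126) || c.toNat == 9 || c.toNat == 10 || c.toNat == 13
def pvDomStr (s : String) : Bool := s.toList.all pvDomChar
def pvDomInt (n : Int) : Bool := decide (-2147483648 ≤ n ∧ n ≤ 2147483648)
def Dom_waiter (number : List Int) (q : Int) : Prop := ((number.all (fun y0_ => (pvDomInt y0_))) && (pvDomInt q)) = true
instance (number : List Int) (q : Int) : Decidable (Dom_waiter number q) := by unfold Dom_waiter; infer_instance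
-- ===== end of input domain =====

-- B replaces A's q filtering passes (each popping the whole stack) by one classification pass
-- into q+1 buckets emitted with an alternating-reversal flag; objective: alternative (same value, different algorithm).

-- ===== PORT A =====
-- generate_primes(limit): sieve of Eratosthenes; `int(limit**0.5)` is ported as Nat.sqrt,
-- exact at the only call site limit = 10000 (sqrt is the integer 100).
def generatePrimes (limit : Int) : List Int :=
  let sieve := ((Array.replicate (limit.toNat + 1) true).set! 0 false).set! 1 false
  let sieve := (PySem.List.pyRange 2 ((Nat.sqrt limit.toNat : Int) + 1) 1).foldl
    (fun sv i =>
      if sv.getD i.toNat false then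
        (PySem.List.pyRange (i * i) (limit + 1) i).foldl (fun sv2 j => sv2.set! j.toNat false) sv
      else sv) sieve
  (PySem.List.enumerate sieve.toList 0).filterMap
    (fun ib => if ib.2 then some ib.1 else none)

-- the inner `while A: plate = A.pop(); …` — popping the stack is reading its reverse front-to-back
def popAll (prime : Int) : List Int → List Int → List Int → List Int × List Int
  | [], aNext, b => (aNext, b)
  | plate :: rest, aNext, b =>
      if PySem.Int.mod plate prime == 0 then popAll prime rest aNext (b ++ [plate])
      else popAll prime rest (aNext ++ [plate]) b

def waiter (number : List Int) (q : Int) : List Int :=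
  let primes := generatePrimes 10000
  let st := (PySem.List.pyRange 0 q 1).foldl
    (fun (st : List Int × List Int) i =>
      let prime := (PySem.List.pyGet? primes i).getD 0   -- in range for every i < q when q ≤ 1229
      let ab := popAll prime st.1.reverse [] []
      (ab.1, st.2 ++ ab.2.reverse)) (number, [])
  st.2 ++ st.1.reverse

-- ===== PORT B =====
-- `next((j for j, p in enumerate(ps) if plate % p == 0), qq)`: first dividing index, else len ps
def firstIdx (ps : List Int) (plate : Int) : Nat :=
  match ps with
  | [] => 0
  | p :: rest => if PySem.Int.mod plate p == 0 then 0 else firstIdx rest plate + 1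

-- the `while buckets: b = buckets.pop(0); …` emission loop with its alternating flag
def emitFlip : Bool → List (List Int) → List Int
  | _, [] => []
  | flip, [b] => if flip then b else b.reverse
  | flip, b :: bs => (if flip then b.reverse else b) ++ emitFlip (!flip) bs

def waiter_alt (number : List Int) (q : Int) : List Int :=
  let primes := generatePrimes 10000
  let qq := q.toNat          -- max(q, 0)
  let ps := (List.range qq).map (fun (i : Nat) => (PySem.List.pyGet? primes (i : Int)).getD 0)
  let buckets := number.foldl
    (fun bs plate => bs.modify (firstIdx ps plate) (· ++ [plate]))
    (List.replicate (qq + 1) [])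
  emitFlip false buckets

-- ===== PRECONDITION & SPEC =====
-- generate_primes(10000) has 1229 primes; for q > 1229 Python A raises IndexError at primes[i].
def Pre_waiter (number : List Int) (q : Int) : Prop := q ≤ 1229
instance (number : List Int) (q : Int) : Decidable (Pre_waiter number q) := by
  unfold Pre_waiter; infer_instance
def pvWitness_waiter : List Int × Int := ([4, 1, 3, 2, 6, 5, 7, 30], 3)

def Spec_waiter (number : List Int) (q : Int) (out : List Int) : Prop := out = waiter_alt number q
instance (number : List Int) (q : Int) (out : List Int) : Decidable (Spec_waiter number q out) := by
  unfold Spec_waiter; infer_instance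

-- ===== CLAIM (what is proved, stated in full; the proofs are below) =====
def Claim_equal_waiter : Prop := ∀ (number : List Int) (q : Int),
  Dom_waiter number q → Pre_waiter number q → Spec_waiter number q (waiter number q)

-- ===== LEMMAS AND PROOFS =====

-- divisibility test both programs use
def divB (p x : Int) : Bool := PySem.Int.mod x p == 0

-- common specification: one filtering round per prime, remaining stack reversed each round
def gSpec : List Int → List Int → List Int
  | [], A => A.reverse
  | p :: ps, A => A.filter (divB p) ++ gSpec ps ((A.filter (fun x => !divB p x)).reverse)

-- buckets of B, described by recursion on the prime list
def bSpec : List Int → List Int → List (List Int)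
  | [], xs => [xs]
  | p :: ps, xs => xs.filter (divB p) :: bSpec ps (xs.filter (fun x => !divB p x))

lemma popAll_eq (p : Int) (l aN b : List Int) :
    popAll p l aN b = (aN ++ l.filter (fun x => !divB p x), b ++ l.filter (divB p)) := by
  induction l generalizing aN b with
  | nil => simp [popAll]
  | cons x rest ih =>
    by_cases h : divB p x
    · simp [popAll, divB] at h ⊢
      simp [h, ih, divB]
    · simp [divB] at h
      simp [popAll, h, ih, divB]

lemma stepA_pair (p : Int) (A ans : List Int) :
    ((popAll p A.reverse [] []).1, ans ++ (popAll p A.reverse [] []).2.reverse)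
    = ((A.filter (fun x => !divB p x)).reverse, ans ++ A.filter (divB p)) := by
  simp [popAll_eq, List.filter_reverse]

lemma foldlA_eq (primes : List Int) (idxs : List Nat) (A ans : List Int) :
    (idxs.foldl (fun (st : List Int × List Int) (k : Nat) =>
        ((popAll ((PySem.List.pyGet? primes (k : Int)).getD 0) st.1.reverse [] []).1,
          st.2 ++ (popAll ((PySem.List.pyGet? primes (k : Int)).getD 0) st.1.reverse [] []).2.reverse))
      (A, ans)).2
    ++ (idxs.foldl (fun (st : List Int × List Int) (k : Nat) =>
        ((popAll ((PySem.List.pyGet? primes (k : Int)).getD 0) st.1.reverse [] []).1,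
          st.2 ++ (popAll ((PySem.List.pyGet? primes (k : Int)).getD 0) st.1.reverse [] []).2.reverse))
      (A, ans)).1.reverse
    = ans ++ gSpec (idxs.map (fun (k : Nat) => (PySem.List.pyGet? primes (k : Int)).getD 0)) A := by
  induction idxs generalizing A ans with
  | nil => simp [gSpec]
  | cons k idxs ih =>
    rw [List.foldl_cons, stepA_pair, ih, List.map_cons, gSpec]
    simp

lemma bSpec_nil (ps : List Int) : bSpec ps [] = List.replicate (ps.length + 1) [] := by
  induction ps with
  | nil => simp [bSpec]
  | cons p ps ih => simp [bSpec, ih, List.replicate_succ]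

lemma bSpec_append_one (ps : List Int) (xs : List Int) (x : Int) :
    bSpec ps (xs ++ [x]) = (bSpec ps xs).modify (firstIdx ps x) (· ++ [x]) := by
  induction ps generalizing xs with
  | nil => simp [bSpec, firstIdx]
  | cons p ps ih =>
    by_cases h : PySem.Int.mod x p == 0
    · simp [bSpec, firstIdx, h, List.filter_append, divB]
    · simp [bSpec, firstIdx, h, List.filter_append, divB, ih]

lemma buckets_eq (ps : List Int) (number : List Int) :
    number.foldl (fun bs plate => bs.modify (firstIdx ps plate) (· ++ [plate]))
      (List.replicate (ps.length + 1) [])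
    = bSpec ps number := by
  induction number using List.reverseRecOn with
  | nil => simp [bSpec_nil]
  | append_singleton xs x ih => rw [List.foldl_append, ih, List.foldl_cons, List.foldl_nil,
      bSpec_append_one]

lemma bSpec_reverse (ps : List Int) (xs : List Int) :
    bSpec ps xs.reverse = (bSpec ps xs).map List.reverse := by
  induction ps generalizing xs with
  | nil => simp [bSpec]
  | cons p ps ih => simp [bSpec, List.filter_reverse, ih]

lemma emitFlip_map_reverse (flip : Bool) (bs : List (List Int)) :
    emitFlip flip (bs.map List.reverse) = emitFlip (!flip) bs := by
  induction bs generalizing flip with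
  | nil => simp [emitFlip]
  | cons b tl ih =>
    cases tl with
    | nil => cases flip <;> simp [emitFlip]
    | cons c tl' =>
      simp only [List.map_cons, emitFlip]
      rw [← List.map_cons, ih]
      cases flip <;> simp

lemma emitFlip_eq_gSpec (ps : List Int) (xs : List Int) :
    emitFlip false (bSpec ps xs) = gSpec ps xs := by
  induction ps generalizing xs with
  | nil => simp [bSpec, gSpec, emitFlip]
  | cons p ps ih =>
    have hrw : emitFlip false (bSpec (p :: ps) xs)
        = xs.filter (divB p) ++ emitFlip true (bSpec ps (xs.filter (fun x => !divB p x))) := by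
      cases hb : bSpec ps (xs.filter (fun x => !divB p x)) with
      | nil => cases ps <;> simp [bSpec] at hb
      | cons h t => simp [bSpec, emitFlip, hb]
    rw [hrw, gSpec, ← ih ((xs.filter (fun x => !divB p x)).reverse), bSpec_reverse,
      emitFlip_map_reverse]
    rfl

-- ===== VERDICT (by name: the statement is the Claim_ definition above) =====
theorem waiter_spec : Claim_equal_waiter := by
  intro number q _hdom _hpre
  unfold Spec_waiter waiter waiter_alt
  rw [PySem.List.pyRange_one]
  simp only [Int.sub_zero, List.foldl_map, zero_add]
  rw [foldlA_eq (generatePrimes 10000) (List.range q.toNat) number []]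
  rw [show (q.toNat + 1) = ((List.range q.toNat).map
      (fun (k : Nat) => (PySem.List.pyGet? (generatePrimes 10000) (k : Int)).getD 0)).length + 1 by
    simp]
  rw [buckets_eq, emitFlip_eq_gSpec]
  simp
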